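-- pv_equiv track=rewrite | github.com/omtripathi786/scaler_practice_data_structure | Module_2/carry_forward/subsequences _AG.py | solve
-- ===== SOURCE A (Python) =====
-- def solve(A):
--     count = 0
--     ans = 0
--     for i in range(len(A)):
--         if A[i] == 'A':
--             count += 1
--         elif A[i] == 'G':
--             ans += count
--     return ans
-- ===== SOURCE B (Python) =====
-- def solve(A):
--     # Two-pass: first build prefix counts of 'A', then sum them at 'G' positions.
--     pref = []
--     c = 0
--     for ch in A:
--         pref.append(c)
--         if ch == 'A':
--             c += 1
--     ans = 0
--     for i in range(len(A)):
--         if A[i] == 'G':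
--             ans += pref[i]
--     return ans
-- ===== Notes on version B (the rewrite author's own statement) =====
-- stated objective: alternative
-- what changed: Replaces the single interleaved scan with an explicit prefix-count table built in one pass, then a second pass summing the table entries at 'G' positions.
import Mathlib
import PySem

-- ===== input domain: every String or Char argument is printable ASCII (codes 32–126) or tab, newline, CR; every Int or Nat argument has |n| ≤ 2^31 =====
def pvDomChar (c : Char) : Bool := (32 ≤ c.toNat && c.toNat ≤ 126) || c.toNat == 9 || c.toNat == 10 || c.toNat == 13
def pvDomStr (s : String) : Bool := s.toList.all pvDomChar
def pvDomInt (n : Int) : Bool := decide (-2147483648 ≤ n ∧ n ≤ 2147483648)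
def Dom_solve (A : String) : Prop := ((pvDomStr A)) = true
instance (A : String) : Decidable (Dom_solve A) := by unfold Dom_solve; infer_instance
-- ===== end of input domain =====

-- ===== PORT A =====
-- single scan carrying (count of 'A's seen, running answer)
def solve (A : String) : Int :=
  (A.toList.foldl (fun (st : Int × Int) ch =>
    if ch = 'A' then (st.1 + 1, st.2)
    else if ch = 'G' then (st.1, st.2 + st.1)
    else st) (0, 0)).2

-- ===== PORT B =====
-- pref l c = list of running counts of 'A' (starting from c), one entry per position
def buildPref : List Char → Int → List Int
  | [], _ => []
  | ch :: t, c => c :: buildPref t (if ch = 'A' then c + 1 else c)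

def solve_alt (A : String) : Int :=
  let pref := buildPref A.toList 0
  (List.zip A.toList pref).foldl
    (fun ans p => if p.1 = 'G' then ans + p.2 else ans) 0

-- ===== PRECONDITION & SPEC =====
def Spec_solve (A : String) (out : Int) : Prop := out = solve_alt A
instance (A : String) (out : Int) : Decidable (Spec_solve A out) := by unfold Spec_solve; infer_instance

-- ===== CLAIM (what is proved, stated in full; the proofs are below) =====
def Claim_equal_solve : Prop := ∀ (A : String), Dom_solve A → Spec_solve A (solve A)

-- ===== LEMMAS AND PROOFS =====

-- ===== VERDICT (by name: the statement is the Claim_ definition above) =====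
lemma solve_key : ∀ (l : List Char) (c a : Int),
    (l.foldl (fun (st : Int × Int) ch =>
      if ch = 'A' then (st.1 + 1, st.2)
      else if ch = 'G' then (st.1, st.2 + st.1)
      else st) (c, a)).2
    = (List.zip l (buildPref l c)).foldl
        (fun ans p => if p.1 = 'G' then ans + p.2 else ans) a := by
  intro l
  induction l with
  | nil => intro c a; rfl
  | cons ch t ih =>
    intro c a
    by_cases hA : ch = 'A'
    · simp [buildPref, hA, List.foldl, ih]
    · by_cases hG : ch = 'G'
      · simp [buildPref, hG, List.foldl, ih]
      · simp [buildPref, hA, hG, List.foldl, ih]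

theorem solve_spec : Claim_equal_solve := by
  intro A _
  unfold Spec_solve solve solve_alt
  exact solve_key A.toList 0 0
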